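-- pv_equiv track=rewrite | github.com/Tiantainer/opensource_software | bug_issues.py | _extract_severity
-- ===== SOURCE A (Python) =====
-- def _extract_severity(labels) -> str:
--     """从标签中提取严重程度"""
--     severity_keywords = {
--         '严重': ['critical', 'severe', 'major', 'high'],
--         '中等': ['medium', 'moderate', 'normal'],
--         '轻微': ['minor', 'low', 'trivial']
--     }
--
--     label_texts = [label.lower() for label in labels]
--
--     for severity, keywords in severity_keywords.items():
--         if any(any(keyword in label for keyword in keywords) for label in label_texts):
--             return severity
--
--     return '未指定'
-- ===== SOURCE B (Python) =====
-- def _extract_severity(labels) -> str: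
--     """从标签中提取严重程度 — one pass over labels building a matched-severity set, then fixed priority order."""
--     categories = [
--         ('严重', ['critical', 'severe', 'major', 'high']),
--         ('中等', ['medium', 'moderate', 'normal']),
--         ('轻微', ['minor', 'low', 'trivial']),
--     ]
--     matched = set()
--     for label in labels:
--         text = label.lower()
--         for name, keywords in categories:
--             if any(k in text for k in keywords):
--                 matched.add(name)
--     for name, _ in categories:
--         if name in matched:
--             return name
--     return '未指定'
-- ===== Notes on version B (the rewrite author's own statement) =====
-- stated objective: alternative
-- what changed: B makes one pass over the labels building a set of matched severity categories, then returns the first category of the fixed priority list present in the set, instead of A's per-category scan over all lowercased labels.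
import Mathlib
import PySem

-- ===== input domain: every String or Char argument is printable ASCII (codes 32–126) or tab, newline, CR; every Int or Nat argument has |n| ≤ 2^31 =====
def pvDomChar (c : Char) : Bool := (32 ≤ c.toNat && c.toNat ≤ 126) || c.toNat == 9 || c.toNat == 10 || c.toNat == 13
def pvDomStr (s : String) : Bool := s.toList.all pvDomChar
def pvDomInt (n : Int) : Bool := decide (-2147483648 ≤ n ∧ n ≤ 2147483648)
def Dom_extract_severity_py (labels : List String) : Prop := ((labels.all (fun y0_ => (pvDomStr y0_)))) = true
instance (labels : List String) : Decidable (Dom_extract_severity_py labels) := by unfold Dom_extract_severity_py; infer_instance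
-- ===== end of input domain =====

-- B does one pass over the labels, building a set of matched severity categories,
-- then returns the first category of the fixed priority list present in the set (objective: alternative decomposition).

-- ===== PORT A =====
-- the severity_keywords dict, in insertion order
def sevKeywordsA : List (String × List String) :=
  [("严重", ["critical", "severe", "major", "high"]),
   ("中等", ["medium", "moderate", "normal"]),
   ("轻微", ["minor", "low", "trivial"])]

-- 'for severity, keywords in severity_keywords.items(): if any(any(...)): return severity'
def loopA (cats : List (String × List String)) (label_texts : List String) : String :=
  match cats with
  | [] => "未指定"
  | (severity, keywords) :: rest =>
      if label_texts.any (fun label => keywords.any (fun keyword => PySem.Str.isIn keyword label)) then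
        severity
      else loopA rest label_texts

def extract_severity_py (labels : List String) : String :=
  let label_texts := labels.map PySem.Str.lower
  loopA sevKeywordsA label_texts

-- ===== PORT B =====
def categoriesB : List (String × List String) :=
  [("严重", ["critical", "severe", "major", "high"]),
   ("中等", ["medium", "moderate", "normal"]),
   ("轻微", ["minor", "low", "trivial"])]

-- one pass: for each label, add every matching category name to the matched set
def matchedB (labels : List String) : PySem.Set String :=
  labels.foldl (fun matched label =>
    let text := PySem.Str.lower label
    categoriesB.foldl (fun matched p =>
      if p.2.any (fun k => PySem.Str.isIn k text) then PySem.Set.add matched p.1 else matched)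
      matched)
    PySem.Set.empty

-- 'for name, _ in categories: if name in matched: return name'
def firstMatchedB (cats : List (String × List String)) (matched : PySem.Set String) : String :=
  match cats with
  | [] => "未指定"
  | (name, _) :: rest =>
      if PySem.Set.contains matched name then name else firstMatchedB rest matched

def extract_severity_py_alt (labels : List String) : String :=
  firstMatchedB categoriesB (matchedB labels)

-- ===== PRECONDITION & SPEC =====
def Spec_extract_severity_py (labels : List String) (out : String) : Prop := out = extract_severity_py_alt labels
instance (labels : List String) (out : String) : Decidable (Spec_extract_severity_py labels out) := by unfold Spec_extract_severity_py; infer_instance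

-- ===== CLAIM (what is proved, stated in full; the proofs are below) =====
def Claim_equal_extract_severity_py : Prop := ∀ (labels : List String), Dom_extract_severity_py labels → Spec_extract_severity_py labels (extract_severity_py labels)

-- ===== LEMMAS AND PROOFS =====

-- does one label (lowered) hit a keyword list
def hitK (kws : List String) (label : String) : Bool :=
  kws.any (fun k => PySem.Str.isIn k (PySem.Str.lower label))

lemma ne_sev_med : (("严重" : String) = "中等") ↔ False := by decide
lemma ne_sev_min : (("严重" : String) = "轻微") ↔ False := by decide
lemma ne_med_sev : (("中等" : String) = "严重") ↔ False := by decide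
lemma ne_med_min : (("中等" : String) = "轻微") ↔ False := by decide
lemma ne_min_sev : (("轻微" : String) = "严重") ↔ False := by decide
lemma ne_min_med : (("轻微" : String) = "中等") ↔ False := by decide

-- membership of a fixed category name in the matched set built from 'labels', starting from 's'
lemma mem_fold_sev (labels : List String) (s : PySem.Set String) :
    ("严重" ∈ labels.foldl (fun matched label =>
      let text := PySem.Str.lower label
      categoriesB.foldl (fun matched p =>
        if p.2.any (fun k => PySem.Str.isIn k text) then PySem.Set.add matched p.1 else matched)
        matched) s)
      ↔ ("严重" ∈ s ∨ labels.any (hitK ["critical", "severe", "major", "high"]) = true) := by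
  induction labels generalizing s with
  | nil => simp
  | cons l t ih =>
    rw [List.foldl_cons, ih]
    simp only [categoriesB, List.foldl_cons, List.foldl_nil, List.any_cons, hitK, Bool.or_eq_true]
    split_ifs <;>
      (try simp_all [PySem.Set.mem_add, ne_sev_med, ne_sev_min])

lemma mem_fold_med (labels : List String) (s : PySem.Set String) :
    ("中等" ∈ labels.foldl (fun matched label =>
      let text := PySem.Str.lower label
      categoriesB.foldl (fun matched p =>
        if p.2.any (fun k => PySem.Str.isIn k text) then PySem.Set.add matched p.1 else matched)
        matched) s)
      ↔ ("中等" ∈ s ∨ labels.any (hitK ["medium", "moderate", "normal"]) = true) := by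
  induction labels generalizing s with
  | nil => simp
  | cons l t ih =>
    rw [List.foldl_cons, ih]
    simp only [categoriesB, List.foldl_cons, List.foldl_nil, List.any_cons, hitK, Bool.or_eq_true]
    split_ifs <;>
      (try simp_all [PySem.Set.mem_add, ne_med_sev, ne_med_min])

lemma mem_fold_min (labels : List String) (s : PySem.Set String) :
    ("轻微" ∈ labels.foldl (fun matched label =>
      let text := PySem.Str.lower label
      categoriesB.foldl (fun matched p =>
        if p.2.any (fun k => PySem.Str.isIn k text) then PySem.Set.add matched p.1 else matched)
        matched) s)
      ↔ ("轻微" ∈ s ∨ labels.any (hitK ["minor", "low", "trivial"]) = true) := by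
  induction labels generalizing s with
  | nil => simp
  | cons l t ih =>
    rw [List.foldl_cons, ih]
    simp only [categoriesB, List.foldl_cons, List.foldl_nil, List.any_cons, hitK, Bool.or_eq_true]
    split_ifs <;>
      (try simp_all [PySem.Set.mem_add, ne_min_sev, ne_min_med])

lemma contains_matchedB (labels : List String) (name : String)
    (kws : List String)
    (h : name ∈ matchedB labels ↔ (name ∈ (PySem.Set.empty : PySem.Set String) ∨ labels.any (hitK kws) = true)) :
    PySem.Set.contains (matchedB labels) name = labels.any (hitK kws) := by
  have h' : name ∈ matchedB labels ↔ labels.any (hitK kws) = true := by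
    simpa [PySem.Set.empty] using h
  cases hb : labels.any (hitK kws) with
  | true => simp [PySem.Set.contains, h'.mpr hb]
  | false =>
    have : name ∉ matchedB labels := fun hm => by simp [h'.mp hm] at hb
    simp [PySem.Set.contains, this]

-- A's inner condition over the pre-lowered texts equals hitK over the raw labels
lemma anyA_eq (labels kws : List String) :
    ((labels.map PySem.Str.lower).any (fun label => kws.any (fun keyword => PySem.Str.isIn keyword label)))
      = labels.any (hitK kws) := by
  rw [List.any_map]; rfl

-- ===== VERDICT (by name: the statement is the Claim_ definition above) =====
theorem extract_severity_py_spec : Claim_equal_extract_severity_py := by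
  intro labels _
  unfold Spec_extract_severity_py extract_severity_py extract_severity_py_alt
  have c1 := contains_matchedB labels "严重" ["critical", "severe", "major", "high"]
    (mem_fold_sev labels PySem.Set.empty)
  have c2 := contains_matchedB labels "中等" ["medium", "moderate", "normal"]
    (mem_fold_med labels PySem.Set.empty)
  have c3 := contains_matchedB labels "轻微" ["minor", "low", "trivial"]
    (mem_fold_min labels PySem.Set.empty)
  simp only [sevKeywordsA, categoriesB, loopA, firstMatchedB, anyA_eq, c1, c2, c3]
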